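-- pv_equiv track=rewrite | github.com/Kerem-Aslan/math432-implementation-homeworks | Homework1/permutation_polynomials_z26.py | _build_power_table
-- ===== SOURCE A (Python) =====
-- def _build_power_table(prime: int) -> tuple[list[int], list[int], list[int], list[int], list[int]]:
--     elements = list(range(prime))
--     x1 = elements
--     x2 = [(x * x) % prime for x in elements]
--     x3 = [(x2[index] * x1[index]) % prime for index in elements]
--     x4 = [(x3[index] * x1[index]) % prime for index in elements]
--     x5 = [(x4[index] * x1[index]) % prime for index in elements]
--     return x1, x2, x3, x4, x5
-- ===== SOURCE B (Python) =====
-- def _build_power_table(prime: int) -> tuple[list[int], list[int], list[int], list[int], list[int]]: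
--     def column(k):
--         return [pow(x, k, prime) for x in range(prime)]
--     return column(1), column(2), column(3), column(4), column(5)
-- ===== Notes on version B (the rewrite author's own statement) =====
-- stated objective: alternative
-- what changed: Replaces A's chained table construction (each power table built by multiplying the previous table entry by x via index lookups) with five independent columns computed by direct modular exponentiation pow(x, k, prime), with no recurrence between tables.
import Mathlib
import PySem

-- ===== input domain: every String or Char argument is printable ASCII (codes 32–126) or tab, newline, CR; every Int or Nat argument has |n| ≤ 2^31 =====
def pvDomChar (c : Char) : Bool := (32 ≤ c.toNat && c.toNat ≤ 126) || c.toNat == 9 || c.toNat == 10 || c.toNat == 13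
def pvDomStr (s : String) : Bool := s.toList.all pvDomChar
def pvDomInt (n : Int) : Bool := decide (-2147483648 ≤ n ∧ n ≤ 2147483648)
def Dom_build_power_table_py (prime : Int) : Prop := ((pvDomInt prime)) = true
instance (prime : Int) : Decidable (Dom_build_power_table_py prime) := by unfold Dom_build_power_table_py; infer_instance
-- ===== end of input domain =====

-- B computes each table independently by direct modular exponentiation pow(x, k, prime)
-- instead of A's chained table products with index lookups (alternative algorithm, similar cost).


-- ===== PORT A =====
-- x2[index] etc. are always in range (index ∈ range(prime) indexes lists of length prime),
-- so Python never raises IndexError; pyGetD _ _ 0 is exact here.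
def build_power_table_py (prime : Int) : List Int × List Int × List Int × List Int × List Int :=
  let elements := PySem.List.pyRange 0 prime 1
  let x1 := elements
  let x2 := elements.map (fun x => PySem.Int.mod (x * x) prime)
  let x3 := elements.map (fun index =>
    PySem.Int.mod (PySem.List.pyGetD x2 index 0 * PySem.List.pyGetD x1 index 0) prime)
  let x4 := elements.map (fun index =>
    PySem.Int.mod (PySem.List.pyGetD x3 index 0 * PySem.List.pyGetD x1 index 0) prime)
  let x5 := elements.map (fun index =>
    PySem.Int.mod (PySem.List.pyGetD x4 index 0 * PySem.List.pyGetD x1 index 0) prime)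
  (x1, x2, x3, x4, x5)

-- ===== PORT B =====
-- pow(x, k, prime) is PySem.Int.powMod; it is only evaluated for x ∈ range(prime), where prime > 0.
def bpt_column (prime : Int) (k : Nat) : List Int :=
  (PySem.List.pyRange 0 prime 1).map (fun x => PySem.Int.powMod x k prime)

def build_power_table_py_alt (prime : Int) : List Int × List Int × List Int × List Int × List Int :=
  (bpt_column prime 1, bpt_column prime 2, bpt_column prime 3, bpt_column prime 4, bpt_column prime 5)

-- ===== PRECONDITION & SPEC =====
def Spec_build_power_table_py (prime : Int) (out : List Int × List Int × List Int × List Int × List Int) : Prop := out = build_power_table_py_alt prime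
instance (prime : Int) (out : List Int × List Int × List Int × List Int × List Int) : Decidable (Spec_build_power_table_py prime out) := by unfold Spec_build_power_table_py; infer_instance

-- ===== CLAIM (what is proved, stated in full; the proofs are below) =====
def Claim_equal_build_power_table_py : Prop := ∀ (prime : Int), Dom_build_power_table_py prime → Spec_build_power_table_py prime (build_power_table_py prime)

-- ===== LEMMAS AND PROOFS =====

-- the per-element power chain A computes
def pf2 (prime x : Int) : Int := PySem.Int.mod (x * x) prime
def pf3 (prime x : Int) : Int := PySem.Int.mod (pf2 prime x * x) prime
def pf4 (prime x : Int) : Int := PySem.Int.mod (pf3 prime x * x) prime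
def pf5 (prime x : Int) : Int := PySem.Int.mod (pf4 prime x * x) prime

theorem pyGetD_pyRange_zero (n i : Int) (h0 : 0 ≤ i) (h1 : i < n) :
    PySem.List.pyGetD (PySem.List.pyRange 0 n 1) i 0 = i := by
  have := PySem.List.pyGetD_map_pyRange_of_nonneg (f := id) (n := n) (i := i) (d := 0) h0 h1
  simpa using this

-- A's result, characterised column-wise
theorem build_power_table_py_eq (prime : Int) :
    build_power_table_py prime =
      (PySem.List.pyRange 0 prime 1,
       (PySem.List.pyRange 0 prime 1).map (pf2 prime),
       (PySem.List.pyRange 0 prime 1).map (pf3 prime),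
       (PySem.List.pyRange 0 prime 1).map (pf4 prime),
       (PySem.List.pyRange 0 prime 1).map (pf5 prime)) := by
  unfold build_power_table_py
  have hget : ∀ (f : Int → Int) (i : Int), 0 ≤ i → i < prime →
      PySem.List.pyGetD ((PySem.List.pyRange 0 prime 1).map f) i 0 = f i := by
    intro f i h0 h1
    exact PySem.List.pyGetD_map_pyRange_of_nonneg f prime i 0 h0 h1
  have h3 : ((PySem.List.pyRange 0 prime 1).map (fun index =>
      PySem.Int.mod (PySem.List.pyGetD ((PySem.List.pyRange 0 prime 1).map (fun x => PySem.Int.mod (x*x) prime)) index 0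
        * PySem.List.pyGetD (PySem.List.pyRange 0 prime 1) index 0) prime)) =
      (PySem.List.pyRange 0 prime 1).map (pf3 prime) := by
    apply List.map_congr_left
    intro i hi
    rcases (PySem.List.mem_pyRange_one).1 hi with ⟨h0, h1⟩
    rw [hget _ i h0 h1, pyGetD_pyRange_zero prime i h0 h1]
    rfl
  simp only []
  rw [h3]
  have h4 : ((PySem.List.pyRange 0 prime 1).map (fun index =>
      PySem.Int.mod (PySem.List.pyGetD ((PySem.List.pyRange 0 prime 1).map (pf3 prime)) index 0
        * PySem.List.pyGetD (PySem.List.pyRange 0 prime 1) index 0) prime)) =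
      (PySem.List.pyRange 0 prime 1).map (pf4 prime) := by
    apply List.map_congr_left
    intro i hi
    rcases (PySem.List.mem_pyRange_one).1 hi with ⟨h0, h1⟩
    rw [hget _ i h0 h1, pyGetD_pyRange_zero prime i h0 h1]
    rfl
  rw [h4]
  have h5 : ((PySem.List.pyRange 0 prime 1).map (fun index =>
      PySem.Int.mod (PySem.List.pyGetD ((PySem.List.pyRange 0 prime 1).map (pf4 prime)) index 0
        * PySem.List.pyGetD (PySem.List.pyRange 0 prime 1) index 0) prime)) =
      (PySem.List.pyRange 0 prime 1).map (pf5 prime) := by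
    apply List.map_congr_left
    intro i hi
    rcases (PySem.List.mem_pyRange_one).1 hi with ⟨h0, h1⟩
    rw [hget _ i h0 h1, pyGetD_pyRange_zero prime i h0 h1]
    rfl
  rw [h5]
  rfl

-- pulling an inner mod out of a product
theorem mod_mul_mod (p a x : Int) (hp : 0 < p) :
    PySem.Int.mod (PySem.Int.mod a p * x) p = PySem.Int.mod (a * x) p := by
  rw [PySem.Int.mod_eq_emod_of_pos hp, PySem.Int.mod_eq_emod_of_pos hp,
      PySem.Int.mod_eq_emod_of_pos hp, Int.mul_emod, Int.emod_emod_of_dvd _ dvd_rfl,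
      ← Int.mul_emod]

theorem pf2_eq (p x : Int) : pf2 p x = PySem.Int.mod (x ^ 2) p := by
  unfold pf2; ring_nf

theorem pf3_eq (p x : Int) (hp : 0 < p) : pf3 p x = PySem.Int.mod (x ^ 3) p := by
  unfold pf3; rw [pf2_eq, mod_mul_mod _ _ _ hp]; ring_nf

theorem pf4_eq (p x : Int) (hp : 0 < p) : pf4 p x = PySem.Int.mod (x ^ 4) p := by
  unfold pf4; rw [pf3_eq _ _ hp, mod_mul_mod _ _ _ hp]; ring_nf

theorem pf5_eq (p x : Int) (hp : 0 < p) : pf5 p x = PySem.Int.mod (x ^ 5) p := by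
  unfold pf5; rw [pf4_eq _ _ hp, mod_mul_mod _ _ _ hp]; ring_nf

theorem bpt_column_one (prime : Int) :
    bpt_column prime 1 = PySem.List.pyRange 0 prime 1 := by
  unfold bpt_column
  have : ∀ x ∈ PySem.List.pyRange 0 prime 1, PySem.Int.powMod x 1 prime = x := by
    intro x hx
    rcases (PySem.List.mem_pyRange_one).1 hx with ⟨h0, h1⟩
    rw [PySem.Int.powMod_eq_emod _ _ (by omega), pow_one, Int.emod_eq_of_lt h0 h1]
  rw [List.map_congr_left this, List.map_id']

theorem bpt_column_eq (prime : Int) (k : Nat) (g : Int → Int)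
    (hg : ∀ x, 0 < prime → g x = PySem.Int.mod (x ^ k) prime) :
    bpt_column prime k = (PySem.List.pyRange 0 prime 1).map g := by
  unfold bpt_column
  apply List.map_congr_left
  intro x hx
  rcases (PySem.List.mem_pyRange_one).1 hx with ⟨h0, h1⟩
  rw [PySem.Int.powMod_eq, hg x (by omega)]

-- ===== VERDICT (by name: the statement is the Claim_ definition above) =====
theorem build_power_table_py_spec : Claim_equal_build_power_table_py := by
  intro prime _
  unfold Spec_build_power_table_py build_power_table_py_alt
  rw [build_power_table_py_eq, bpt_column_one,
      bpt_column_eq prime 2 (pf2 prime) (fun x _ => pf2_eq prime x),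
      bpt_column_eq prime 3 (pf3 prime) (fun x hp => pf3_eq prime x hp),
      bpt_column_eq prime 4 (pf4 prime) (fun x hp => pf4_eq prime x hp),
      bpt_column_eq prime 5 (pf5 prime) (fun x hp => pf5_eq prime x hp)]
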